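-- pv_equiv track=rewrite | github.com/dirtysalt/codes | aoc2023/day15.py | solve
-- ===== SOURCE A (Python) =====
-- def solve(s):
--     ss = s.split(',')
--     ans = 0
--     for s in ss:
--         value = 0
--         for c in s:
--             value += ord(c)
--             value = value * 17 % 256
--         ans += value
--     return ans
-- ===== SOURCE B (Python) =====
-- def solve(s):
--     # Evaluate each token's AoC hash as a polynomial sum ord(c)*17^j mod 256,
--     # scanning the string once from the END with a running power of 17.
--     ans = 0
--     t = 0
--     p = 17
--     for c in reversed(s):
--         if c == ',':
--             ans += t % 256
--             t = 0
--             p = 17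
--         else:
--             t += ord(c) * p
--             p = p * 17 % 256
--     return ans + t % 256
-- ===== Notes on version B (the rewrite author's own statement) =====
-- stated objective: alternative
-- what changed: Instead of splitting on commas and Horner-hashing each token left-to-right ((v+ord)*17%256 per char), B makes one reverse pass over the raw string evaluating each token's hash as the polynomial sum of ord(c)*17^j mod 256 with a running power of 17 that resets at each comma.
import Mathlib
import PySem

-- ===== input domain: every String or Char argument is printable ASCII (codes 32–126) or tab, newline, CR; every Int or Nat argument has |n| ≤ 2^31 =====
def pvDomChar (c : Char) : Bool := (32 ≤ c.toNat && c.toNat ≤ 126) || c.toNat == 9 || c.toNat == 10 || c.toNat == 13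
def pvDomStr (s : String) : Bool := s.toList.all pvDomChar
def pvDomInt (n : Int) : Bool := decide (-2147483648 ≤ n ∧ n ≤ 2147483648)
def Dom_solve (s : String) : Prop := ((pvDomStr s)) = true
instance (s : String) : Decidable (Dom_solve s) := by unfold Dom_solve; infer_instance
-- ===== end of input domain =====

-- B replaces split + forward Horner hashing by a single REVERSE pass that evaluates each
-- token's hash as a polynomial sum ord(c)*17^j mod 256 with a running power of 17 (objective: alternative).

-- ===== PORT A =====
def solve (s : String) : Int :=
  (PySem.Chars.splitOn s.toList [',']).foldl
    (fun ans t =>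
      ans + t.foldl (fun value c => PySem.Int.mod ((value + (c.toNat : Int)) * 17) 256) 0) 0

-- ===== PORT B =====
def solve_alt (s : String) : Int :=
  let st := s.toList.reverse.foldl
    (fun (st : Int × Int × Int) c =>
      if c = ',' then (st.1 + PySem.Int.mod st.2.1 256, 0, 17)
      else (st.1, st.2.1 + (c.toNat : Int) * st.2.2, PySem.Int.mod (st.2.2 * 17) 256)) (0, 0, 17)
  st.1 + PySem.Int.mod st.2.1 256

-- ===== PRECONDITION & SPEC =====
def Spec_solve (s : String) (out : Int) : Prop := out = solve_alt s
instance (s : String) (out : Int) : Decidable (Spec_solve s out) := by unfold Spec_solve; infer_instance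

-- ===== CLAIM (what is proved, stated in full; the proofs are below) =====
def Claim_equal_solve : Prop := ∀ (s : String), Dom_solve s → Spec_solve s (solve s)

-- ===== LEMMAS AND PROOFS =====

/-- The per-character hash step A performs (emod form; 256 > 0 so PySem.Int.mod = emod). -/
def pvStep (v : Int) (c : Char) : Int := ((v + (c.toNat : Int)) * 17) % 256

theorem pvStep_eq (v : Int) (c : Char) :
    PySem.Int.mod ((v + (c.toNat : Int)) * 17) 256 = pvStep v c := by
  simp [pvStep]

/-- Comma-splitting with an accumulated (reversed) current token: a direct model of splitOn's loop. -/
def pvSplitP (cur : List Char) : List Char → List (List Char)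
  | [] => [cur.reverse]
  | c :: rest => if c = ',' then cur.reverse :: pvSplitP [] rest else pvSplitP (c :: cur) rest

/-- The total hash sum of a char stream, given the running hash of the current token. -/
def pvAsum (v : Int) : List Char → Int
  | [] => v
  | c :: rest => if c = ',' then v + pvAsum 0 rest else pvAsum (pvStep v c) rest

theorem pvGo_eq_splitP (l : List Char) : ∀ (fuel : Nat) (cur : List Char) (acc : List (List Char)),
    l.length < fuel →
    PySem.Chars.splitOn.go [','] fuel l cur acc = acc.reverse ++ pvSplitP cur l := by
  induction l with
  | nil =>
    intro fuel cur acc h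
    cases fuel with
    | zero => omega
    | succ f => simp [PySem.Chars.splitOn.go, pvSplitP]
  | cons c rest ih =>
    intro fuel cur acc h
    cases fuel with
    | zero => simp at h
    | succ f =>
      by_cases hc : c = ','
      · subst hc
        have hp : List.isPrefixOf [','] (',' :: rest) = true := by
          simp [List.isPrefixOf]
        have hih := ih f [] (cur.reverse :: acc) (by simpa using h)
        simp [PySem.Chars.splitOn.go, hp, hih, pvSplitP]
      · have hp : List.isPrefixOf [','] (c :: rest) = false := by
          simp [List.isPrefixOf]; exact fun hcc => (hc hcc.symm).elim
        have hih := ih f (c :: cur) acc (by simpa using h)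
        simp [PySem.Chars.splitOn.go, hp, hih, pvSplitP, hc]

theorem pvSplitOn_eq (l : List Char) :
    PySem.Chars.splitOn l [','] = pvSplitP [] l := by
  have := pvGo_eq_splitP l (l.length + 1) [] [] (by omega)
  simpa [PySem.Chars.splitOn] using this

theorem pvFoldl_hash_splitP (l : List Char) : ∀ (cur : List Char) (ans : Int),
    (pvSplitP cur l).foldl (fun a t => a + t.foldl pvStep 0) ans
      = ans + pvAsum (cur.reverse.foldl pvStep 0) l := by
  induction l with
  | nil => intro cur ans; simp [pvSplitP, pvAsum]
  | cons c rest ih =>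
    intro cur ans
    by_cases hc : c = ','
    · subst hc
      rw [show pvSplitP cur (',' :: rest) = cur.reverse :: pvSplitP [] rest from by
            simp [pvSplitP],
          show pvAsum (cur.reverse.foldl pvStep 0) (',' :: rest)
              = cur.reverse.foldl pvStep 0 + pvAsum 0 rest from by simp [pvAsum]]
      simp only [List.foldl_cons]
      rw [ih [] (ans + cur.reverse.foldl pvStep 0)]
      simp [add_assoc]
    · rw [show pvSplitP cur (c :: rest) = pvSplitP (c :: cur) rest from by
            simp [pvSplitP, hc],
          show pvAsum (cur.reverse.foldl pvStep 0) (c :: rest)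
              = pvAsum (pvStep (cur.reverse.foldl pvStep 0) c) rest from by simp [pvAsum, hc]]
      rw [ih (c :: cur) ans]
      simp [List.foldl_append]

/-- A's whole computation equals pvAsum 0. -/
theorem pvSolve_eq_asum (s : String) : solve s = pvAsum 0 s.toList := by
  have e : (fun (value : Int) (c : Char) => PySem.Int.mod ((value + (c.toNat : Int)) * 17) 256)
      = pvStep := by funext v c; exact pvStep_eq v c
  have h := pvFoldl_hash_splitP s.toList [] 0
  simp only [List.reverse_nil, List.foldl_nil, zero_add] at h
  simp only [solve, pvSplitOn_eq, e, h]

/-- Polynomial value of a token: each char weighted by 17^(distance-from-right + 1). -/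
def pvPoly : List Char → Int
  | [] => 0
  | c :: l => (c.toNat : Int) * 17 ^ (l.length + 1) + pvPoly l

/-- The tokens after the first comma, hashed and summed (A-style). -/
def pvTail (l : List Char) : Int :=
  match l.dropWhile (fun c => c != ',') with
  | [] => 0
  | _ :: r => pvAsum 0 r

/-- Horner evaluation (A's inner loop) equals the polynomial sum mod 256. -/
theorem pvHorner_poly : ∀ (l : List Char) (v : Int),
    l.foldl pvStep (v % 256) = (v * 17 ^ l.length + pvPoly l) % 256 := by
  intro l
  induction l with
  | nil => intro v; simp [pvPoly]
  | cons c rest ih =>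
    intro v
    have h1 : pvStep (v % 256) c = ((v + (c.toNat : Int)) * 17) % 256 := by
      have : (v % 256 + (c.toNat : Int)) * 17 % 256 = ((v + (c.toNat : Int)) * 17) % 256 :=
        Int.ModEq.mul_right 17 (Int.ModEq.add_right _ (Int.emod_emod_of_dvd v dvd_rfl))
      simpa [pvStep] using this
    calc (c :: rest).foldl pvStep (v % 256)
        = rest.foldl pvStep (((v + (c.toNat : Int)) * 17) % 256) := by
          simp [List.foldl_cons, h1]
      _ = ((v + (c.toNat : Int)) * 17 * 17 ^ rest.length + pvPoly rest) % 256 := ih _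
      _ = (v * 17 ^ (c :: rest).length + pvPoly (c :: rest)) % 256 := by
          simp [pvPoly, pow_succ]; ring_nf

theorem pvHorner_poly0 (l : List Char) :
    l.foldl pvStep 0 = pvPoly l % 256 := by
  have := pvHorner_poly l 0
  simpa using this

/-- A-sum decomposes into the first token's Horner hash plus the tail total. -/
theorem pvAsum_decomp : ∀ (l : List Char) (v : Int),
    pvAsum v l = (l.takeWhile (fun c => c != ',')).foldl pvStep v + pvTail l := by
  intro l
  induction l with
  | nil => intro v; simp [pvAsum, pvTail]
  | cons c rest ih =>
    intro v
    by_cases hc : c = ','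
    · subst hc; simp [pvAsum, pvTail, List.takeWhile, List.dropWhile]
    · have hb : (c != ',') = true := by simp [hc]
      simp only [pvAsum, if_neg hc, pvTail, List.takeWhile_cons, List.dropWhile_cons, hb,
        if_true, List.foldl_cons]
      exact ih (pvStep v c)

/-- B's folded state, written as a foldr (foldl over the reverse). -/
def pvBF (l : List Char) : Int × Int × Int :=
  l.foldr
    (fun c st =>
      if c = ',' then (st.1 + PySem.Int.mod st.2.1 256, 0, 17)
      else (st.1, st.2.1 + (c.toNat : Int) * st.2.2, PySem.Int.mod (st.2.2 * 17) 256)) (0, 0, 17)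

theorem pvBF_inv : ∀ (l : List Char),
    (pvBF l).1 = pvTail l
    ∧ (pvBF l).2.1 % 256 = pvPoly (l.takeWhile (fun c => c != ',')) % 256
    ∧ (pvBF l).2.2 = 17 * 17 ^ (l.takeWhile (fun c => c != ',')).length % 256 := by
  intro l
  induction l with
  | nil => refine ⟨rfl, rfl, by norm_num [pvBF]⟩
  | cons c rest ih =>
    obtain ⟨ha, ht, hp⟩ := ih
    by_cases hc : c = ','
    · subst hc
      have hm : PySem.Int.mod (pvBF rest).2.1 256 = (pvBF rest).2.1 % 256 :=
        PySem.Int.mod_eq_emod_of_pos (by norm_num)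
      refine ⟨?_, ?_, ?_⟩
      · show ((pvBF rest).1 + PySem.Int.mod (pvBF rest).2.1 256) = pvTail (',' :: rest)
        have hdrop : pvTail (',' :: rest) = pvAsum 0 rest := by
          simp [pvTail]
        rw [hdrop, hm, ht, ha, ← pvHorner_poly0, pvAsum_decomp rest 0]
        omega
      · show (0 : Int) % 256 = pvPoly (List.takeWhile (fun c => c != ',') (',' :: rest)) % 256
        simp [pvPoly]
      · show (17 : Int) = 17 * 17 ^ (List.takeWhile (fun c => c != ',') (',' :: rest)).length % 256
        simp
    · have hb : (c != ',') = true := by simp [hc]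
      have step1 : (pvBF (c :: rest)).1 = (pvBF rest).1 := by
        simp [pvBF, List.foldr_cons, hc]
      have step2 : (pvBF (c :: rest)).2.1 = (pvBF rest).2.1 + (c.toNat : Int) * (pvBF rest).2.2 := by
        simp [pvBF, List.foldr_cons, hc]
      have step3 : (pvBF (c :: rest)).2.2 = PySem.Int.mod ((pvBF rest).2.2 * 17) 256 := by
        simp [pvBF, List.foldr_cons, hc]
      have htake : (c :: rest).takeWhile (fun c => c != ',') =
          c :: rest.takeWhile (fun c => c != ',') := by
        simp [hb]
      refine ⟨?_, ?_, ?_⟩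
      · rw [step1, ha]
        simp [pvTail, hb]
      · rw [step2, htake]
        -- t ≡ poly tok, p ≡ 17^(k+1)  ⇒  t + c*p ≡ c*17^(k+1) + poly tok  (mod 256)
        have hpc : (pvBF rest).2.2 % 256
            = (17 * 17 ^ (rest.takeWhile (fun c => c != ',')).length) % 256 := by
          rw [hp]; exact Int.emod_emod_of_dvd _ dvd_rfl
        have h1 : Int.ModEq 256 (pvBF rest).2.1
            (pvPoly (rest.takeWhile (fun c => c != ','))) := ht
        have h2 : Int.ModEq 256 ((c.toNat : Int) * (pvBF rest).2.2)
            ((c.toNat : Int) * (17 * 17 ^ (rest.takeWhile (fun c => c != ',')).length)) :=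
          Int.ModEq.mul_left _ hpc
        have := h1.add h2
        calc ((pvBF rest).2.1 + (c.toNat : Int) * (pvBF rest).2.2) % 256
            = (pvPoly (rest.takeWhile (fun c => c != ','))
                + (c.toNat : Int) * (17 * 17 ^ (rest.takeWhile (fun c => c != ',')).length)) % 256 :=
              this
          _ = pvPoly (c :: rest.takeWhile (fun c => c != ',')) % 256 := by
              simp [pvPoly, pow_succ]; ring_nf
      · rw [step3, htake, PySem.Int.mod_eq_emod_of_pos (by norm_num)]
        have : (pvBF rest).2.2 * 17 % 256
            = (17 * 17 ^ (rest.takeWhile (fun c => c != ',')).length * 17) % 256 := by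
          rw [hp]; exact Int.ModEq.mul_right 17 (Int.emod_emod_of_dvd _ dvd_rfl)
        rw [this]
        congr 1
        simp [List.length_cons, pow_succ]; ring

-- ===== VERDICT (by name: the statement is the Claim_ definition above) =====
theorem solve_spec : Claim_equal_solve := by
  intro s _
  show solve s = solve_alt s
  rw [pvSolve_eq_asum]
  obtain ⟨ha, ht, _⟩ := pvBF_inv s.toList
  have hB : solve_alt s = (pvBF s.toList).1 + PySem.Int.mod (pvBF s.toList).2.1 256 := by
    simp [solve_alt, pvBF, List.foldl_reverse]
  rw [hB, PySem.Int.mod_eq_emod_of_pos (by norm_num), ha, ht, ← pvHorner_poly0,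
    pvAsum_decomp s.toList 0]
  omega
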